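-- pv_equiv track=rewrite | github.com/MaratPereverzev/AOIS | Lab7/DiagonalMatrix.py | compare_bits_gl
-- ===== SOURCE A (Python) =====
-- from typing import List
-- from typing import List
--
-- def compare_bits_gl(word_bits: List[int], target_bits: List[int]) -> str:
--     g = [int(tb > wb) for tb, wb in zip(target_bits, word_bits)]
--     l = [int(tb < wb) for tb, wb in zip(target_bits, word_bits)]
--
--     g_and_not_l = [gi & (1 - li) for gi, li in zip(g, l)]
--     l_and_not_g = [li & (1 - gi) for gi, li in zip(g, l)]
--
--     if any(g_and_not_l):
--         return "target_greater"
--     elif any(l_and_not_g):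
--         return "target_less"
--     else:
--         return "equal"
-- ===== SOURCE B (Python) =====
-- from typing import List
--
-- def compare_bits_gl(word_bits: List[int], target_bits: List[int]) -> str:
--     saw_less = False
--     for tb, wb in zip(target_bits, word_bits):
--         if tb > wb:
--             return "target_greater"
--         if tb < wb:
--             saw_less = True
--     return "target_less" if saw_less else "equal"
-- ===== Notes on version B (the rewrite author's own statement) =====
-- stated objective: simpler
-- what changed: The four materialized list comprehensions and two any() scans are replaced by a single early-exit pass over zip(target_bits, word_bits) maintaining one saw_less flag.
import Mathlib
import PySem

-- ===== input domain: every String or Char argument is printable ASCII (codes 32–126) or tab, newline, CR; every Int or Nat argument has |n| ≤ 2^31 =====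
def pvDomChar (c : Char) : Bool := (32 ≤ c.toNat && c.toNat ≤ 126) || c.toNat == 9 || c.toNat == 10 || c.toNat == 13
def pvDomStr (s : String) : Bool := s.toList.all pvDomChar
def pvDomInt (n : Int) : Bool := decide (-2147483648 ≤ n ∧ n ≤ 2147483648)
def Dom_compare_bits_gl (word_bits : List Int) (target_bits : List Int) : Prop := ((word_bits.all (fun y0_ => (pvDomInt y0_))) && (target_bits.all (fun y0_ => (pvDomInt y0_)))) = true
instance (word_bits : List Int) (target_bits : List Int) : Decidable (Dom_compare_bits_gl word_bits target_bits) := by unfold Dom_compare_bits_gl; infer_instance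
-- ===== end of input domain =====

-- B replaces A's four list comprehensions and two any() scans with one early-exit pass keeping a single saw_less flag (simpler, no intermediate lists).


-- ===== PORT A =====
-- Literal transliteration: builds the four intermediate lists g, l, g_and_not_l,
-- l_and_not_g (with Python's int(...) as 0/1 and `&` as Int.land), then the two any() scans
-- (Python truthiness on ints = nonzero).
def compare_bits_gl (word_bits : List Int) (target_bits : List Int) : String :=
  let g := (target_bits.zip word_bits).map (fun p => if p.1 > p.2 then (1 : Int) else 0)
  let l := (target_bits.zip word_bits).map (fun p => if p.1 < p.2 then (1 : Int) else 0)
  let g_and_not_l := (g.zip l).map (fun p => Int.land p.1 (1 - p.2))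
  let l_and_not_g := (g.zip l).map (fun p => Int.land p.2 (1 - p.1))
  if g_and_not_l.any (fun x => x ≠ 0) then "target_greater"
  else if l_and_not_g.any (fun x => x ≠ 0) then "target_less"
  else "equal"

-- ===== PORT B =====
-- B's single early-exit loop over zip(target_bits, word_bits) with the saw_less flag.
def compareBitsGlLoop : List (Int × Int) → Bool → String
  | [], sawLess => if sawLess then "target_less" else "equal"
  | (tb, wb) :: rest, sawLess =>
    if tb > wb then "target_greater"
    else compareBitsGlLoop rest (sawLess || decide (tb < wb))

def compare_bits_gl_alt (word_bits : List Int) (target_bits : List Int) : String :=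
  compareBitsGlLoop (target_bits.zip word_bits) false

-- ===== PRECONDITION & SPEC =====
def Spec_compare_bits_gl (word_bits : List Int) (target_bits : List Int) (out : String) : Prop := out = compare_bits_gl_alt word_bits target_bits
instance (word_bits : List Int) (target_bits : List Int) (out : String) : Decidable (Spec_compare_bits_gl word_bits target_bits out) := by unfold Spec_compare_bits_gl; infer_instance

-- ===== CLAIM (what is proved, stated in full; the proofs are below) =====
def Claim_equal_compare_bits_gl : Prop := ∀ (word_bits : List Int) (target_bits : List Int), Dom_compare_bits_gl word_bits target_bits → Spec_compare_bits_gl word_bits target_bits (compare_bits_gl word_bits target_bits)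

-- ===== LEMMAS AND PROOFS =====

-- Canonical form both sides reduce to.
def cmpCanon (ps : List (Int × Int)) : String :=
  if ps.any (fun p => decide (p.1 > p.2)) then "target_greater"
  else if ps.any (fun p => decide (p.1 < p.2)) then "target_less"
  else "equal"

theorem loop_eq_canon (ps : List (Int × Int)) (s : Bool) :
    compareBitsGlLoop ps s =
      (if ps.any (fun p => decide (p.1 > p.2)) then "target_greater"
       else if s || ps.any (fun p => decide (p.1 < p.2)) then "target_less" else "equal") := by
  induction ps generalizing s with
  | nil => simp [compareBitsGlLoop]
  | cons hd tl ih =>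
    obtain ⟨tb, wb⟩ := hd
    by_cases hgt : tb > wb
    · simp [compareBitsGlLoop, hgt]
    · simp only [compareBitsGlLoop, if_neg hgt, ih, List.any_cons]
      rw [decide_eq_false hgt, Bool.false_or, Bool.or_assoc]; rfl

theorem alt_eq_canon (w t : List Int) :
    compare_bits_gl_alt w t = cmpCanon (t.zip w) := by
  unfold compare_bits_gl_alt cmpCanon
  rw [loop_eq_canon, Bool.false_or]

theorem pointwise_g (p : Int × Int) :
    (decide (Int.land (if p.1 > p.2 then (1 : Int) else 0)
        (1 - if p.1 < p.2 then (1 : Int) else 0) ≠ 0)) = decide (p.1 > p.2) := by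
  rcases lt_trichotomy p.1 p.2 with h | h | h
  · rw [if_neg (not_lt_of_gt h), if_pos h, decide_eq_false (not_lt_of_gt h)]; decide
  · rw [if_neg (by omega : ¬ p.1 > p.2), if_neg (by omega : ¬ p.1 < p.2),
      decide_eq_false (by omega : ¬ p.1 > p.2)]; decide
  · rw [if_pos h, if_neg (not_lt_of_gt h), decide_eq_true h]; decide

theorem pointwise_l (p : Int × Int) :
    (decide (Int.land (if p.1 < p.2 then (1 : Int) else 0)
        (1 - if p.1 > p.2 then (1 : Int) else 0) ≠ 0)) = decide (p.1 < p.2) := by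
  rcases lt_trichotomy p.1 p.2 with h | h | h
  · rw [if_pos h, if_neg (not_lt_of_gt h), decide_eq_true h]; decide
  · rw [if_neg (by omega : ¬ p.1 < p.2), if_neg (by omega : ¬ p.1 > p.2),
      decide_eq_false (by omega : ¬ p.1 < p.2)]; decide
  · rw [if_neg (not_lt_of_gt h), if_pos h, decide_eq_false (not_lt_of_gt h)]; decide

theorem a_eq_canon (w t : List Int) :
    compare_bits_gl w t = cmpCanon (t.zip w) := by
  simp only [compare_bits_gl, cmpCanon, List.zip_map', List.map_map, List.any_map]
  have h1 : ((fun x : Int => decide (x ≠ 0)) ∘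
      ((fun p : Int × Int => Int.land p.1 (1 - p.2)) ∘
        fun p : Int × Int =>
          ((if p.1 > p.2 then (1 : Int) else 0), (if p.1 < p.2 then (1 : Int) else 0))))
      = fun p : Int × Int => decide (p.1 > p.2) := by
    funext p; exact pointwise_g p
  have h2 : ((fun x : Int => decide (x ≠ 0)) ∘
      ((fun p : Int × Int => Int.land p.2 (1 - p.1)) ∘
        fun p : Int × Int =>
          ((if p.1 > p.2 then (1 : Int) else 0), (if p.1 < p.2 then (1 : Int) else 0))))
      = fun p : Int × Int => decide (p.1 < p.2) := by
    funext p; exact pointwise_l p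
  rw [h1, h2]

-- ===== VERDICT (by name: the statement is the Claim_ definition above) =====
theorem compare_bits_gl_spec : Claim_equal_compare_bits_gl := by
  intro w t _hdom
  unfold Spec_compare_bits_gl
  rw [a_eq_canon, alt_eq_canon]
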